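-- pv_equiv track=rewrite | github.com/hksawczuk/grahamtools | src/grahamtools/linegraph/adjlist.py | is_regular
-- ===== SOURCE A (Python) =====
-- from typing import List, Sequence, Tuple
--
-- def is_regular(adj: Sequence[Sequence[int]]) -> tuple[bool, int]:
--     """
--     Returns (is_regular, degree_if_regular_else_-1).
--     Empty graph is considered regular of degree 0.
--     """
--     n = len(adj)
--     if n == 0:
--         return True, 0
--     d0 = len(adj[0])
--     for u in range(1, n):
--         if len(adj[u]) != d0:
--             return False, -1
--     return True, d0
-- ===== SOURCE B (Python) =====
-- def is_regular(adj):
--     """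
--     Returns (is_regular, degree_if_regular_else_-1).
--     Empty graph is considered regular of degree 0.
--     """
--     if not adj:
--         return True, 0
--     lens = [len(row) for row in adj]
--     lo, hi = min(lens), max(lens)
--     return (True, lo) if lo == hi else (False, -1)
-- ===== Notes on version B (the rewrite author's own statement) =====
-- stated objective: alternative
-- what changed: Instead of scanning rows and comparing each length to the first with early exit, B reduces the list of row lengths with min and max and decides regularity by the arithmetic test min == max (equal extremes force all lengths equal), returning the minimum as the degree.
import Mathlib
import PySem

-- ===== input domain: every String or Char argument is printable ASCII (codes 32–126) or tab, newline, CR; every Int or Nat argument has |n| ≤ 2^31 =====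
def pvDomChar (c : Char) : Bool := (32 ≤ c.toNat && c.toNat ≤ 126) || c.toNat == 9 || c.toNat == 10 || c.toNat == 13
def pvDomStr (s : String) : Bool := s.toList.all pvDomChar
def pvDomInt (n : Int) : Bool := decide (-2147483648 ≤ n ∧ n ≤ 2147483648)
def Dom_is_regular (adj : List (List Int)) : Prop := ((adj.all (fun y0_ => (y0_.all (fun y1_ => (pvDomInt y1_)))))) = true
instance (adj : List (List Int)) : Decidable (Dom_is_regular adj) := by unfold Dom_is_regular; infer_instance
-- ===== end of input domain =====

-- B decides regularity arithmetically from min and max of the row lengths (equal extremes <=> all equal) instead of A's scan comparing each row's length to the first with early exit; alternative algorithm, same cost.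


-- ===== PORT A =====
-- the 'for u in range(1, n)' loop: compare each remaining row's length to d0, early return on mismatch
def isRegularLoop (d0 : Int) : List (List Int) → Bool × Int
  | [] => (true, d0)
  | u :: rest => if (u.length : Int) ≠ d0 then (false, -1) else isRegularLoop d0 rest

def is_regular (adj : List (List Int)) : Bool × Int :=
  match adj with
  | [] => (true, 0)
  | a0 :: rest => isRegularLoop (a0.length : Int) rest

-- ===== PORT B =====
def is_regular_alt (adj : List (List Int)) : Bool × Int :=
  if adj = [] then (true, 0)
  else
    let lens := adj.map (fun row => (row.length : Int))
    -- lo, hi = min(lens), max(lens); lens is nonempty here, so min?/max? are some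
    match PySem.List.min? lens (fun x => x), PySem.List.max? lens (fun x => x) with
    | some lo, some hi => if lo = hi then (true, lo) else (false, -1)
    | _, _ => (false, -1)   -- unreachable: lens ≠ []

-- ===== PRECONDITION & SPEC =====
def Spec_is_regular (adj : List (List Int)) (out : Bool × Int) : Prop := out = is_regular_alt adj
instance (adj : List (List Int)) (out : Bool × Int) : Decidable (Spec_is_regular adj out) := by unfold Spec_is_regular; infer_instance

-- ===== CLAIM (what is proved, stated in full; the proofs are below) =====
def Claim_equal_is_regular : Prop := ∀ (adj : List (List Int)), Dom_is_regular adj → Spec_is_regular adj (is_regular adj)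

-- ===== LEMMAS AND PROOFS =====

-- A's loop in closed form
theorem isRegularLoop_eq (d0 : Int) (l : List (List Int)) :
    isRegularLoop d0 l =
      if ∀ u ∈ l, (u.length : Int) = d0 then (true, d0) else (false, -1) := by
  induction l with
  | nil => simp [isRegularLoop]
  | cons u rest ih =>
    by_cases h : (u.length : Int) = d0
    · simp [isRegularLoop, h, ih]
    · simp [isRegularLoop, h]

theorem foldl_min_le_init (l : List Int) : ∀ (a : Int), l.foldl min a ≤ a := by
  induction l with
  | nil => intro a; simp
  | cons x t ih =>
    intro a
    calc (x :: t).foldl min a = t.foldl min (min a x) := by simp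
    _ ≤ min a x := ih _
    _ ≤ a := min_le_left _ _

theorem foldl_min_le_mem (l : List Int) : ∀ (a x : Int), x ∈ l → l.foldl min a ≤ x := by
  induction l with
  | nil => intro a x h; simp at h
  | cons y t ih =>
    intro a x h
    rcases List.mem_cons.mp h with rfl | h
    · calc (x :: t).foldl min a = t.foldl min (min a x) := by simp
      _ ≤ min a x := foldl_min_le_init t _
      _ ≤ x := min_le_right _ _
    · exact ih _ _ h

theorem init_le_foldl_max (l : List Int) : ∀ (a : Int), a ≤ l.foldl max a := by
  induction l with
  | nil => intro a; simp
  | cons x t ih =>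
    intro a
    calc a ≤ max a x := le_max_left _ _
    _ ≤ t.foldl max (max a x) := ih _
    _ = (x :: t).foldl max a := by simp

theorem mem_le_foldl_max (l : List Int) : ∀ (a x : Int), x ∈ l → x ≤ l.foldl max a := by
  induction l with
  | nil => intro a x h; simp at h
  | cons y t ih =>
    intro a x h
    rcases List.mem_cons.mp h with rfl | h
    · calc x ≤ max a x := le_max_right _ _
      _ ≤ t.foldl max (max a x) := init_le_foldl_max t _
      _ = (x :: t).foldl max a := by simp
    · exact ih _ _ h

theorem foldl_min_of_all_eq (l : List Int) (a : Int) (h : ∀ x ∈ l, x = a) :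
    l.foldl min a = a := by
  induction l with
  | nil => rfl
  | cons y t ih =>
    have hy : y = a := h y List.mem_cons_self
    simp only [List.foldl_cons, hy, min_self]
    exact ih (fun x hx => h x (List.mem_cons_of_mem _ hx))

theorem foldl_max_of_all_eq (l : List Int) (a : Int) (h : ∀ x ∈ l, x = a) :
    l.foldl max a = a := by
  induction l with
  | nil => rfl
  | cons y t ih =>
    have hy : y = a := h y List.mem_cons_self
    simp only [List.foldl_cons, hy, max_self]
    exact ih (fun x hx => h x (List.mem_cons_of_mem _ hx))

theorem main_lemma (adj : List (List Int)) : is_regular adj = is_regular_alt adj := by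
  match adj with
  | [] => rfl
  | a0 :: rest =>
    simp only [is_regular, is_regular_alt, isRegularLoop_eq, List.map_cons, if_neg (List.cons_ne_nil a0 rest)]
    set d0 : Int := (a0.length : Int) with hd0
    set ds : List Int := rest.map (fun row => (row.length : Int)) with hds
    rw [PySem.List.min?_id_cons, PySem.List.max?_id_cons]
    by_cases h : ∀ u ∈ rest, (u.length : Int) = d0
    · have hall : ∀ x ∈ ds, x = d0 := by
        intro x hx; obtain ⟨u, hu, rfl⟩ := List.mem_map.mp hx; exact h u hu
      rw [foldl_min_of_all_eq ds d0 hall, foldl_max_of_all_eq ds d0 hall, if_pos h]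
      simp
    · push Not at h
      obtain ⟨u, hu, hne⟩ := h
      have hmem : (u.length : Int) ∈ ds := List.mem_map.mpr ⟨u, hu, rfl⟩
      have h1 : ds.foldl min d0 ≤ (u.length : Int) := foldl_min_le_mem ds d0 _ hmem
      have h2 : ds.foldl min d0 ≤ d0 := foldl_min_le_init ds d0
      have h3 : d0 ≤ ds.foldl max d0 := init_le_foldl_max ds d0
      have h4 : (u.length : Int) ≤ ds.foldl max d0 := mem_le_foldl_max ds d0 _ hmem
      have hlohi : ds.foldl min d0 ≠ ds.foldl max d0 := by
        intro he
        apply hne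
        omega
      have hnotall : ¬ ∀ v ∈ rest, (v.length : Int) = d0 := fun hh => hne (hh u hu)
      simp [hnotall, hlohi]

-- ===== VERDICT (by name: the statement is the Claim_ definition above) =====
theorem is_regular_spec : Claim_equal_is_regular := by
  intro adj _
  unfold Spec_is_regular
  exact main_lemma adj
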